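-- pv_equiv track=rewrite | github.com/adapt-sjtu/AMTTL | data_utils.py | minibatches_evaluate
-- ===== SOURCE A (Python) =====
-- def minibatches_evaluate(data, minibatch_size, mini_padding=True):
--     """
--     Args:
--         data: generator of (sentence, tags) tuples
--         minibatch_size: (int)
--     Returns:
--         list of tuples
--     """
--     # if mini_padding:
--     #     data.sort(key=lambda x: len(x[0]))
--     x_batch, y_batch, z_batch = [], [], []
--     for x, y, z in data:
--         if len(x_batch) == minibatch_size:
--             yield x_batch, y_batch, z_batch
--             x_batch, y_batch, z_batch = [], [], []
--
--         x_batch += [x]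
--         y_batch += [y]
--         z_batch += [z]
--
--     if len(x_batch) != 0:
--         yield x_batch, y_batch, z_batch
-- ===== SOURCE B (Python) =====
-- def minibatches_evaluate(data, minibatch_size, mini_padding=True):
--     buf = list(data)
--     while buf:
--         chunk, buf = buf[:minibatch_size], buf[minibatch_size:]
--         xs, ys, zs = (list(t) for t in zip(*chunk))
--         yield xs, ys, zs
-- ===== Notes on version B (the rewrite author's own statement) =====
-- stated objective: idiomatic
-- what changed: Replaces the per-element loop with three incrementally grown parallel lists and a flush-on-full branch by slicing fixed-size chunks off the front of the materialized data and transposing each chunk with zip(*chunk) at yield time.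
-- outside the precondition, e.g. on minibatches_evaluate([([1], [2], [3])], -1, True): A returns [([[1]], [[2]], [[3]])], B raises ValueError
import Mathlib
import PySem

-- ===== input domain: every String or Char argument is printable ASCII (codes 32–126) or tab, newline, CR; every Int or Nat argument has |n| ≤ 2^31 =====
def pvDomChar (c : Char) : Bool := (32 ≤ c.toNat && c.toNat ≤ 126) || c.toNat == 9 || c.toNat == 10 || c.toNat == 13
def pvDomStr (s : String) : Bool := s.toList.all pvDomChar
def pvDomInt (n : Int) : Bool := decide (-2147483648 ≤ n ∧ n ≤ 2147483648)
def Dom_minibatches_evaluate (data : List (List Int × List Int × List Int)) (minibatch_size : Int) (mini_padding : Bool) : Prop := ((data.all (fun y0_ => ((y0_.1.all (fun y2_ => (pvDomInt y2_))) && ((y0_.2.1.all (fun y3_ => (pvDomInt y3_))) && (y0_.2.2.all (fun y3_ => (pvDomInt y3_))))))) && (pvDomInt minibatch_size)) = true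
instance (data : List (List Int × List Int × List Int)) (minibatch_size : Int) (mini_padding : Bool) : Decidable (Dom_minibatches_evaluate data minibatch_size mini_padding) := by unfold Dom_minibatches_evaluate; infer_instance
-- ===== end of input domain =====

-- B replaces A's flush-on-full loop with three grown parallel lists by slicing fixed-size
-- chunks off the front and transposing each chunk at yield time (idiomatic; same cost).


-- ===== PORT A =====
-- the generator's for-loop over data with the three accumulator lists; yields collected in order
def mbGoA (m : Int) : List (List Int × List Int × List Int) → List (List Int) → List (List Int) → List (List Int) → List (List (List Int) × List (List Int) × List (List Int))
  | [], xb, yb, zb => if xb.length ≠ 0 then [(xb, yb, zb)] else []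
  | (x, y, z) :: rest, xb, yb, zb =>
    if (xb.length : Int) = m then
      (xb, yb, zb) :: mbGoA m rest ([] ++ [x]) ([] ++ [y]) ([] ++ [z])
    else
      mbGoA m rest (xb ++ [x]) (yb ++ [y]) (zb ++ [z])

def minibatches_evaluate (data : List (List Int × List Int × List Int)) (minibatch_size : Int) (mini_padding : Bool) : List (List (List Int) × List (List Int) × List (List Int)) :=
  mbGoA minibatch_size data [] [] []

-- ===== PORT B =====
-- the while-loop: slice a chunk off the front, transpose it with zip(*chunk), recurse on the rest.
-- When the sliced chunk is empty Python raises ValueError unpacking zip(*chunk); that branch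
-- (reachable only outside Pre_) returns [] here.
def mbGoB (m : Int) (buf : List (List Int × List Int × List Int)) : List (List (List Int) × List (List Int) × List (List Int)) :=
  if hbuf : buf = [] then []
  else
    let chunk := PySem.List.slice buf none (some m)
    if hc : chunk = [] then []  -- Python: ValueError (not enough values to unpack); outside Pre_
    else
      (chunk.map (·.1), chunk.map (·.2.1), chunk.map (·.2.2)) ::
        mbGoB m (PySem.List.slice buf (some m) none)
termination_by buf.length
decreasing_by
  have hc' : 0 < (PySem.List.slice buf none (some m)).length :=
    List.length_pos_of_ne_nil hc
  have hlen := PySem.List.length_slice (xs := buf) (a := 0) (b := m)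
  simp only [PySem.List.slice_zero_start] at hlen
  rw [hlen] at hc'
  have hle := PySem.List.clampIdx_le (n := buf.length) (i := m)
  have h2 : 1 ≤ buf.length := by
    cases buf with
    | nil => exact absurd rfl hbuf
    | cons a l => simp
  simp only [PySem.List.slice_some_none, List.length_drop]
  omega

def minibatches_evaluate_alt (data : List (List Int × List Int × List Int)) (minibatch_size : Int) (mini_padding : Bool) : List (List (List Int) × List (List Int) × List (List Int)) :=
  mbGoB minibatch_size data

-- ===== PRECONDITION & SPEC =====
-- Pre_ excludes nonempty data with minibatch_size ≤ 0, a degenerate batch size on which A's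
-- values (an empty batch first for size 0, one unbounded batch for negative sizes) are
-- accidents of its flush test and on which B raises ValueError.
def Pre_minibatches_evaluate (data : List (List Int × List Int × List Int)) (minibatch_size : Int) (mini_padding : Bool) : Prop :=
  1 ≤ minibatch_size ∨ data = []
instance (data : List (List Int × List Int × List Int)) (minibatch_size : Int) (mini_padding : Bool) : Decidable (Pre_minibatches_evaluate data minibatch_size mini_padding) := by unfold Pre_minibatches_evaluate; infer_instance

def pvWitness_minibatches_evaluate : (List (List Int × List Int × List Int)) × Int × Bool :=
  ([([1], [2], [3]), ([4], [5], [6]), ([7], [8], [9])], 2, true)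

def Spec_minibatches_evaluate (data : List (List Int × List Int × List Int)) (minibatch_size : Int) (mini_padding : Bool) (out : List (List (List Int) × List (List Int) × List (List Int))) : Prop := out = minibatches_evaluate_alt data minibatch_size mini_padding
instance (data : List (List Int × List Int × List Int)) (minibatch_size : Int) (mini_padding : Bool) (out : List (List (List Int) × List (List Int) × List (List Int))) : Decidable (Spec_minibatches_evaluate data minibatch_size mini_padding out) := by unfold Spec_minibatches_evaluate; infer_instance

-- ===== CLAIM (what is proved, stated in full; the proofs are below) =====
def Claim_equal_minibatches_evaluate : Prop := ∀ (data : List (List Int × List Int × List Int)) (minibatch_size : Int) (mini_padding : Bool), Dom_minibatches_evaluate data minibatch_size mini_padding → Pre_minibatches_evaluate data minibatch_size mini_padding → Spec_minibatches_evaluate data minibatch_size mini_padding (minibatches_evaluate data minibatch_size mini_padding)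

-- ===== LEMMAS AND PROOFS =====

-- One step of B's loop, with the slices rewritten to take/drop (valid for 1 ≤ m).
lemma mbGoB_cons (m : Int) (hm : 1 ≤ m) (t : List Int × List Int × List Int)
    (l : List (List Int × List Int × List Int)) :
    mbGoB m (t :: l) =
      (((t :: l).take m.toNat).map (·.1), ((t :: l).take m.toNat).map (·.2.1),
        ((t :: l).take m.toNat).map (·.2.2)) :: mbGoB m ((t :: l).drop m.toNat) := by
  rw [mbGoB]
  have hm0 : (0 : Int) ≤ m := by omega
  simp only [PySem.List.slice_to _ hm0, PySem.List.slice_from _ hm0]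
  have hne : (t :: l).take m.toNat ≠ [] := by
    have : 1 ≤ m.toNat := by omega
    cases h : m.toNat with
    | zero => omega
    | succ k => simp
  simp [hne]

-- Main invariant: when the pending batch p is nonempty with at most m elements, A's loop state
-- (the three projections of p) continues exactly like B's chunk loop on p ++ l.
lemma mbGoA_eq_mbGoB (m : Int) (hm : 1 ≤ m) :
    ∀ (l p : List (List Int × List Int × List Int)), 1 ≤ p.length → p.length ≤ m.toNat →
      mbGoA m l (p.map (·.1)) (p.map (·.2.1)) (p.map (·.2.2)) = mbGoB m (p ++ l) := by
  intro l
  induction l with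
  | nil =>
    intro p h1 h2
    have hp : p ≠ [] := by cases p <;> simp_all
    have hm0 : (0 : Int) ≤ m := by omega
    rw [mbGoA]
    simp only [List.length_map]
    rw [if_pos (by omega), List.append_nil, mbGoB]
    simp only [PySem.List.slice_to _ hm0, PySem.List.slice_from _ hm0]
    have htake : p.take m.toNat = p := List.take_of_length_le h2
    have hdrop : p.drop m.toNat = [] := List.drop_eq_nil_of_le h2
    rw [dif_neg hp]
    simp only [htake, hdrop]
    rw [dif_neg hp]
    rw [mbGoB]
    simp
  | cons t rest ih =>
    obtain ⟨x, y, z⟩ := t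
    intro p h1 h2
    rw [mbGoA]
    simp only [List.length_map]
    by_cases hfull : (p.length : Int) = m
    · rw [if_pos hfull]
      have hpm : p.length = m.toNat := by omega
      have hB := mbGoB_cons m hm (x, y, z) rest
      have hstep : ∀ (q : List (List Int × List Int × List Int)), q = (x,y,z) :: rest →
          mbGoB m (p ++ (x, y, z) :: rest) =
            (p.map (·.1), p.map (·.2.1), p.map (·.2.2)) :: mbGoB m ((x, y, z) :: rest) := by
        intro q hq
        cases hp : p with
        | nil => rw [hp] at h1; simp at h1
        | cons a p' =>
          rw [← hp]
          have hcons : p ++ (x, y, z) :: rest = a :: (p' ++ (x, y, z) :: rest) := by rw [hp]; rfl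
          rw [hcons, mbGoB_cons m hm, ← hcons]
          have htake : (p ++ (x, y, z) :: rest).take m.toNat = p := by
            rw [← hpm, List.take_left]
          have hdrop : (p ++ (x, y, z) :: rest).drop m.toNat = (x, y, z) :: rest := by
            rw [← hpm, List.drop_left]
          rw [htake, hdrop]
      rw [hstep _ rfl]
      have := ih [(x, y, z)] (by simp) (by simp only [List.length_append, List.length_cons, List.length_nil, List.length_singleton]; omega)
      simp only [List.map, List.singleton_append] at this
      rw [show ([] ++ [x]) = [x] from rfl, show ([] ++ [y]) = [y] from rfl,
        show ([] ++ [z]) = [z] from rfl]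
      rw [this]
    · rw [if_neg hfull]
      have hlt : p.length < m.toNat := by omega
      have := ih (p ++ [(x, y, z)]) (by simp) (by simp only [List.length_append, List.length_cons, List.length_nil, List.length_singleton]; omega)
      simp only [List.map_append, List.map] at this
      rw [this]
      simp

-- ===== VERDICT (by name: the statement is the Claim_ definition above) =====
theorem minibatches_evaluate_spec : Claim_equal_minibatches_evaluate := by
  intro data m _mp _hdom hpre
  unfold Spec_minibatches_evaluate minibatches_evaluate minibatches_evaluate_alt
  cases data with
  | nil =>
    rw [mbGoA, mbGoB]
    simp
  | cons t rest =>
    obtain ⟨x, y, z⟩ := t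
    have hm : 1 ≤ m := by
      rcases hpre with h | h
      · exact h
      · exact absurd h (by simp)
    rw [mbGoA]
    simp only [List.length_nil]
    rw [if_neg (by omega)]
    have := mbGoA_eq_mbGoB m hm rest [(x, y, z)] (by simp) (by simp only [List.length_append, List.length_cons, List.length_nil, List.length_singleton]; omega)
    simp only [List.map, List.singleton_append] at this
    rw [show (([] : List (List Int)) ++ [x]) = [x] from rfl,
      show (([] : List (List Int)) ++ [y]) = [y] from rfl,
      show (([] : List (List Int)) ++ [z]) = [z] from rfl]
    exact this
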